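-- pv_equiv track=rewrite | github.com/kijae-kim/JBTI | app/mbti.py | num_to_kor
-- ===== SOURCE A (Python) =====
-- def num_to_kor(num):
--     units = [''] + list('십백천')
--     nums = '일이삼사오육칠팔구'
--     result = ''
--     i = 0
--     while num > 0:
--         n = num % 10
--         if n:
--             result = nums[n-1] + units[i] + result
--         i += 1
--         num //= 10
--     return result if result else '영'
-- ===== SOURCE B (Python) =====
-- def num_to_kor(num):
--     if num <= 0:
--         return '영'
--     units = ['', '십', '백', '천']
--     nums = '일이삼사오육칠팔구'
--     return ''.join(
--         nums[num // 10**p % 10 - 1] + units[p] if num // 10**p % 10 else ''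
--         for p in range(3, -1, -1))
-- ===== Notes on version B (the rewrite author's own statement) =====
-- stated objective: simpler
-- what changed: replaces A's unbounded LSB-first while-loop (divmod state, string prepending) with a closed-form MSB-first join over the four fixed digit positions (thousands, hundreds, tens, ones)
-- outside the precondition, e.g. on num_to_kor(10000): A raises IndexError, B returns ''
import Mathlib
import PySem

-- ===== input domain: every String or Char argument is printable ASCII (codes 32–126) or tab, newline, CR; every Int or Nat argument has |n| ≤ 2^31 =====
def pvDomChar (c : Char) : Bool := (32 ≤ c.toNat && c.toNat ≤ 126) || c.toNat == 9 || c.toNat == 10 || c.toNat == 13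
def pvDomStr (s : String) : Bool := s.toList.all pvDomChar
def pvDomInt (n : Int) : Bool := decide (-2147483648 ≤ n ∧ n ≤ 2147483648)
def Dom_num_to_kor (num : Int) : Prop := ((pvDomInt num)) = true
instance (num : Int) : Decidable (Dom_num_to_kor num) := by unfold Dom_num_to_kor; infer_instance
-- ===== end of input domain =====

-- B replaces A's unbounded LSB-first while-loop with a closed-form MSB-first join over the four
-- fixed digit positions (thousands, hundreds, tens, ones) (objective: simpler; equivalence on num < 10000, where A returns).

-- ===== PORT A =====
-- shared literal tables of the two Pythons
def korNums : List Char := "일이삼사오육칠팔구".toList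
def korUnits : List (List Char) := [[], ['십'], ['백'], ['천']]

-- the while loop; strings built as List Char (Lean's String.append is kernel-opaque).
-- nums[n-1] is in range on every admitted input (1 ≤ n ≤ 9), so pyGetD's default is never taken;
-- units[i] is in range exactly on Pre_ (num < 10000), outside of which Python raises IndexError.
def numToKorLoop (num : Int) (i : Int) (result : List Char) : List Char :=
  if _h : 0 < num then
    let n := PySem.Int.mod num 10
    numToKorLoop (PySem.Int.floordiv num 10) (i + 1)
      (if n ≠ 0 then [PySem.List.pyGetD korNums (n - 1) ' '] ++ PySem.List.pyGetD korUnits i [] ++ result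
       else result)
  else result
termination_by num.toNat
decreasing_by
  have h10 : PySem.Int.floordiv num 10 = num / 10 := PySem.Int.floordiv_eq_ediv_of_pos (by omega)
  rw [h10]; omega

def num_to_kor (num : Int) : String :=
  let result := numToKorLoop num 0 []
  if result ≠ [] then String.ofList result else "영"

-- ===== PORT B =====
-- piece for position p: '' if the digit is 0, else nums[d-1] + units[p]
def korPiece (num : Int) (p : Int) : List Char :=
  let d := PySem.Int.mod (PySem.Int.floordiv num ((10 : Int) ^ p.toNat)) 10   -- 10**p, p ≥ 0 here
  if d ≠ 0 then [PySem.List.pyGetD korNums (d - 1) ' '] ++ PySem.List.pyGetD korUnits p []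
  else []

def num_to_kor_alt (num : Int) : String :=
  if num ≤ 0 then "영"
  else String.ofList (((PySem.List.pyRange 3 (-1) (-1)).map (korPiece num)).flatten)  -- ''.join

-- ===== PRECONDITION & SPEC =====
-- Pre_ excludes exactly num ≥ 10000, where A raises IndexError (units has no symbol beyond 천).
def Pre_num_to_kor (num : Int) : Prop := num < 10000
instance (num : Int) : Decidable (Pre_num_to_kor num) := by unfold Pre_num_to_kor; infer_instance
def pvWitness_num_to_kor : Int := 2043

def Spec_num_to_kor (num : Int) (out : String) : Prop := out = num_to_kor_alt num
instance (num : Int) (out : String) : Decidable (Spec_num_to_kor num out) := by unfold Spec_num_to_kor; infer_instance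

-- ===== CLAIM (what is proved, stated in full; the proofs are below) =====
def Claim_equal_num_to_kor : Prop := ∀ (num : Int), Dom_num_to_kor num → Pre_num_to_kor num → Spec_num_to_kor num (num_to_kor num)

-- ===== LEMMAS AND PROOFS =====
theorem loop_pos (num i : Int) (r : List Char) (h : 0 < num) :
    numToKorLoop num i r = numToKorLoop (PySem.Int.floordiv num 10) (i + 1)
      (if PySem.Int.mod num 10 ≠ 0 then
        [PySem.List.pyGetD korNums (PySem.Int.mod num 10 - 1) ' '] ++ PySem.List.pyGetD korUnits i [] ++ r
       else r) := by
  rw [numToKorLoop]; simp [h]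

theorem loop_nonpos (num i : Int) (r : List Char) (h : ¬ 0 < num) : numToKorLoop num i r = r := by
  rw [numToKorLoop]; simp [h]

theorem main_eq (num : Int) (h : num < 10000) : num_to_kor num = num_to_kor_alt num := by
  by_cases hp : 0 < num
  · -- positive: unfold the loop per magnitude, compare with the four closed-form pieces
    have fd : ∀ a : Int, PySem.Int.floordiv a 10 = a / 10 :=
      fun a => PySem.Int.floordiv_eq_ediv_of_pos (by omega)
    have md : ∀ a : Int, PySem.Int.mod a 10 = a % 10 :=
      fun a => PySem.Int.mod_eq_emod_of_pos (by omega)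
    have u0 : PySem.List.pyGetD korUnits 0 [] = [] := by decide
    have u1 : PySem.List.pyGetD korUnits 1 [] = ['십'] := by decide
    have u2 : PySem.List.pyGetD korUnits 2 [] = ['백'] := by decide
    have u3 : PySem.List.pyGetD korUnits 3 [] = ['천'] := by decide
    have hr : PySem.List.pyRange 3 (-1) (-1) = [3, 2, 1, 0] := by decide
    have hp0 : korPiece num 0 =
        (if num % 10 ≠ 0 then [PySem.List.pyGetD korNums (num % 10 - 1) ' '] else []) := by
      simp only [korPiece]
      rw [show ((10 : Int) ^ ((0 : Int)).toNat) = 1 by norm_num,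
        PySem.Int.floordiv_eq_ediv_of_pos (by norm_num), PySem.Int.mod_eq_emod_of_pos (by norm_num),
        u0]
      simp
    have hp1 : korPiece num 1 =
        (if num / 10 % 10 ≠ 0 then [PySem.List.pyGetD korNums (num / 10 % 10 - 1) ' '] ++ ['십'] else []) := by
      simp only [korPiece]
      rw [show ((10 : Int) ^ ((1 : Int)).toNat) = 10 by norm_num,
        PySem.Int.floordiv_eq_ediv_of_pos (by norm_num), PySem.Int.mod_eq_emod_of_pos (by norm_num),
        u1]
    have hp2 : korPiece num 2 =
        (if num / 100 % 10 ≠ 0 then [PySem.List.pyGetD korNums (num / 100 % 10 - 1) ' '] ++ ['백'] else []) := by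
      simp only [korPiece]
      rw [show ((10 : Int) ^ ((2 : Int)).toNat) = 100 by decide,
        PySem.Int.floordiv_eq_ediv_of_pos (by norm_num), PySem.Int.mod_eq_emod_of_pos (by norm_num),
        u2]
    have hp3 : korPiece num 3 =
        (if num / 1000 % 10 ≠ 0 then [PySem.List.pyGetD korNums (num / 1000 % 10 - 1) ' '] ++ ['천'] else []) := by
      simp only [korPiece]
      rw [show ((10 : Int) ^ ((3 : Int)).toNat) = 1000 by decide,
        PySem.Int.floordiv_eq_ediv_of_pos (by norm_num), PySem.Int.mod_eq_emod_of_pos (by norm_num),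
        u3]
    have hB : num_to_kor_alt num =
        String.ofList (korPiece num 3 ++ (korPiece num 2 ++ (korPiece num 1 ++ (korPiece num 0 ++ [])))) := by
      simp [num_to_kor_alt, hr, show ¬ num ≤ 0 by omega]
    rcases lt_or_ge num 10 with hc | hc1
    · -- one digit
      have d0 : num % 10 = num := by omega
      rw [num_to_kor, loop_pos _ _ _ hp, fd, md]
      rw [show num / 10 = 0 by omega, loop_nonpos _ _ _ (by omega)]
      rw [hB, hp0, hp1, hp2, hp3, u0, d0]
      rw [show num / 10 % 10 = 0 by omega, show num / 100 % 10 = 0 by omega,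
        show num / 1000 % 10 = 0 by omega]
      simp [show num ≠ 0 by omega]
    · rcases lt_or_ge num 100 with hc | hc2
      · -- two digits
        have d1 : num / 10 % 10 = num / 10 := by omega
        rw [num_to_kor, loop_pos _ _ _ hp, fd, md,
          loop_pos _ _ _ (show (0 : Int) < num / 10 by omega), fd, md,
          show num / 10 / 10 = 0 by omega, loop_nonpos _ _ _ (by omega)]
        rw [hB, hp0, hp1, hp2, hp3, u0]
        rw [show num / 100 % 10 = 0 by omega, show num / 1000 % 10 = 0 by omega]
        simp only [show ((0 : Int) + 1) = 1 from rfl, u1, d1]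
        have hne : num / 10 ≠ 0 := by omega
        by_cases h0 : num % 10 = 0 <;> simp [hne, h0]
      · rcases lt_or_ge num 1000 with hc | hc3
        · -- three digits
          have d2 : num / 100 % 10 = num / 100 := by omega
          rw [num_to_kor, loop_pos _ _ _ hp, fd, md,
            loop_pos _ _ _ (show (0 : Int) < num / 10 by omega), fd, md,
            loop_pos _ _ _ (show (0 : Int) < num / 10 / 10 by omega), fd, md,
            show num / 10 / 10 / 10 = 0 by omega, loop_nonpos _ _ _ (by omega),
            show num / 10 / 10 = num / 100 by omega]
          rw [hB, hp0, hp1, hp2, hp3, u0]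
          rw [show num / 1000 % 10 = 0 by omega]
          simp only [show ((0 : Int) + 1) = 1 from rfl, u1, d2]
          have hne : num / 100 ≠ 0 := by omega
          by_cases h0 : num % 10 = 0 <;> by_cases h1 : num / 10 % 10 = 0 <;> simp [hne, h0, h1, u2]
        · -- four digits
          have d3 : num / 1000 % 10 = num / 1000 := by omega
          rw [num_to_kor, loop_pos _ _ _ hp, fd, md,
            loop_pos _ _ _ (show (0 : Int) < num / 10 by omega), fd, md,
            loop_pos _ _ _ (show (0 : Int) < num / 10 / 10 by omega), fd, md,
            loop_pos _ _ _ (show (0 : Int) < num / 10 / 10 / 10 by omega), fd, md,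
            show num / 10 / 10 / 10 / 10 = 0 by omega, loop_nonpos _ _ _ (by omega),
            show num / 10 / 10 / 10 = num / 1000 by omega, show num / 10 / 10 = num / 100 by omega]
          rw [hB, hp0, hp1, hp2, hp3, u0]
          simp only [show ((0 : Int) + 1) = 1 from rfl, u1, d3]
          have hne : num / 1000 ≠ 0 := by omega
          by_cases h0 : num % 10 = 0 <;> by_cases h1 : num / 10 % 10 = 0 <;>
            by_cases h2 : num / 100 % 10 = 0 <;> simp [hne, h0, h1, h2, u2, u3]
  · -- num ≤ 0: the loop never runs, both sides return "영"
    simp [num_to_kor, num_to_kor_alt, loop_nonpos _ _ _ hp, show num ≤ 0 by omega]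

-- ===== VERDICT (by name: the statement is the Claim_ definition above) =====
theorem num_to_kor_spec : Claim_equal_num_to_kor := by
  intro num _ hpre
  exact main_eq num hpre
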